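-- pv_equiv track=rewrite | github.com/glueckf/INES | src/generateEvalPlan.py | traverseList
-- ===== SOURCE A (Python) =====
-- def getCom(mylist):
--     return [(mylist[i],mylist[i+1]) for i in range(len(mylist)) if i < len(mylist) -1 ]
--
-- def traverseList(source, mylist):
--
--     for i in range(len(mylist)):
--
--         if mylist[i]==source[0]:
--             myindex = i
--     firstpart = mylist[:myindex+1]
--     firstpart.reverse()
--     secondpart = mylist[myindex:]
--     mytuples = getCom(firstpart)
--     mytuples += getCom(secondpart)
--     return mytuples
-- ===== SOURCE B (Python) =====
-- def traverseList(source, mylist):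
--     # Scan from the end for the last occurrence (early break), then emit the
--     # pairs by walking indices directly instead of slicing/reversing/copying.
--     for i in range(len(mylist) - 1, -1, -1):
--         if mylist[i] == source[0]:
--             myindex = i
--             break
--     mytuples = []
--     for j in range(myindex, 0, -1):
--         mytuples.append((mylist[j], mylist[j - 1]))
--     for j in range(myindex, len(mylist) - 1):
--         mytuples.append((mylist[j], mylist[j + 1]))
--     return mytuples
-- ===== Notes on version B (the rewrite author's own statement) =====
-- stated objective: alternative
-- what changed: B finds the last matching index by scanning from the end with an early break instead of a full forward scan, and emits the pairs by walking indices down then up instead of building, reversing and re-slicing intermediate list copies.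
import Mathlib
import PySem

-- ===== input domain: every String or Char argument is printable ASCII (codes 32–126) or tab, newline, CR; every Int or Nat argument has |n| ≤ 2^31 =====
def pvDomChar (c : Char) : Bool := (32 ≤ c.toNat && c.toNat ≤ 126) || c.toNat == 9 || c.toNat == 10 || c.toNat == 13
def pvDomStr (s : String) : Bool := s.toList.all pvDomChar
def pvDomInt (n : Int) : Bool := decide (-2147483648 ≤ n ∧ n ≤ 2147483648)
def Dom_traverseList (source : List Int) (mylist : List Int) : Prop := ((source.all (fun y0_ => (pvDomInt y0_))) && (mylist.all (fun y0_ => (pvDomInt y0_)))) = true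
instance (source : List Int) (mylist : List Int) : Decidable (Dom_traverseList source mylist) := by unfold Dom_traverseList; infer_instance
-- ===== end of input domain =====

-- B finds the last matching index by a reverse scan with early break and emits the
-- pairs by direct index walks instead of slicing/reversing intermediate copies (alternative decomposition).


-- ===== PORT A =====
-- helper getCom: [(l[i], l[i+1]) for i in range(len(l)) if i < len(l)-1]
-- (the guard keeps every index in range, so pyGetD with default 0 is exact)
def getCom (l : List Int) : List (Int × Int) :=
  (PySem.List.pyRange 0 l.length 1).foldl
    (fun acc i =>
      if i < (l.length : Int) - 1 then
        acc ++ [(PySem.List.pyGetD l i 0, PySem.List.pyGetD l (i + 1) 0)]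
      else acc) []

def traverseList (source : List Int) (mylist : List Int) : List (Int × Int) :=
  -- for i in range(len(mylist)): if mylist[i]==source[0]: myindex = i
  let idx : Option Int :=
    (PySem.List.pyRange 0 mylist.length 1).foldl
      (fun acc i =>
        if PySem.List.pyGetD mylist i 0 = PySem.List.pyGetD source 0 0 then some i else acc)
      none
  match idx with
  | none => []   -- Python raises NameError here (and IndexError if source = []); excluded by Pre_
  | some m =>
    let firstpart := (PySem.List.slice mylist none (some (m + 1))).reverse
    let secondpart := PySem.List.slice mylist (some m) none
    getCom firstpart ++ getCom secondpart

-- ===== PORT B =====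
-- helper: the reverse index scan with early break (first match over the countdown range)
def findLastIdx (s0 : Int) (mylist : List Int) : List Int → Option Int
  | [] => none
  | i :: rest =>
    if PySem.List.pyGetD mylist i 0 = s0 then some i else findLastIdx s0 mylist rest

def traverseList_alt (source : List Int) (mylist : List Int) : List (Int × Int) :=
  match findLastIdx (PySem.List.pyGetD source 0 0) mylist
      (PySem.List.pyRange ((mylist.length : Int) - 1) (-1) (-1)) with
  | none => []   -- Python raises NameError here (myindex unbound); excluded by Pre_
  | some m =>
    let part1 :=
      (PySem.List.pyRange m 0 (-1)).foldl
        (fun acc j => acc ++ [(PySem.List.pyGetD mylist j 0, PySem.List.pyGetD mylist (j - 1) 0)]) []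
    (PySem.List.pyRange m ((mylist.length : Int) - 1) 1).foldl
      (fun acc j => acc ++ [(PySem.List.pyGetD mylist j 0, PySem.List.pyGetD mylist (j + 1) 0)]) part1

-- ===== PRECONDITION & SPEC =====
-- Pre_ excludes exactly the inputs where Python A raises: IndexError for empty source,
-- NameError (myindex unbound) when source[0] does not occur in mylist.
def Pre_traverseList (source : List Int) (mylist : List Int) : Prop :=
  source ≠ [] ∧ source.headI ∈ mylist
instance (source : List Int) (mylist : List Int) : Decidable (Pre_traverseList source mylist) := by
  unfold Pre_traverseList; infer_instance
def pvWitness_traverseList : List Int × List Int := ([2, 5], [1, 2, 3, 2, 4])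

def Spec_traverseList (source : List Int) (mylist : List Int) (out : List (Int × Int)) : Prop := out = traverseList_alt source mylist
instance (source : List Int) (mylist : List Int) (out : List (Int × Int)) : Decidable (Spec_traverseList source mylist out) := by unfold Spec_traverseList; infer_instance

-- ===== CLAIM (what is proved, stated in full; the proofs are below) =====
def Claim_equal_traverseList : Prop := ∀ (source : List Int) (mylist : List Int), Dom_traverseList source mylist → Pre_traverseList source mylist → Spec_traverseList source mylist (traverseList source mylist)

-- ===== LEMMAS AND PROOFS =====

-- A's "keep the latest match" fold equals first-match search on the reversed list.
theorem foldl_latest_eq_find_reverse (p : Int → Prop) [DecidablePred p]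
    (L : List Int) (acc : Option Int) :
    L.foldl (fun a i => if p i then some i else a) acc =
      match L.reverse.find? (fun i => decide (p i)) with
      | some x => some x
      | none => acc := by
  induction L generalizing acc with
  | nil => simp
  | cons x t ih =>
    simp only [List.foldl_cons, List.reverse_cons, List.find?_append, ih]
    cases h : t.reverse.find? (fun i => decide (p i)) <;> (simp [List.find?]; try (split_ifs <;> simp_all))

theorem findLastIdx_eq_find (s0 : Int) (mylist : List Int) (L : List Int) :
    findLastIdx s0 mylist L =
      L.find? (fun i => decide (PySem.List.pyGetD mylist i 0 = s0)) := by
  induction L with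
  | nil => rfl
  | cons x t ih =>
    simp only [findLastIdx, List.find?]
    split_ifs with h <;> simp_all

-- closed form of getCom
theorem filter_lt_range (n m : Nat) (h : m ≤ n) :
    (List.range n).filter (fun k => decide (k < m)) = List.range m := by
  induction n with
  | zero => simp_all [Nat.le_zero.mp h]
  | succ n ih =>
    rcases Nat.lt_or_ge m (n+1) with h1 | h1
    · rw [List.range_succ, List.filter_append, ih (by omega)]
      simp; omega
    · have : m = n + 1 := by omega
      subst this
      rw [List.filter_eq_self.mpr]
      intro a ha; simp at ha ⊢; omega

theorem getCom_eq (l : List Int) :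
    getCom l = (List.range (l.length - 1)).map
      (fun k => (l.getD k 0, l.getD (k + 1) 0)) := by
  unfold getCom
  have h := PySem.List.foldl_append_if (fun i => decide (i < (l.length : Int) - 1))
      (fun i => (PySem.List.pyGetD l i 0, PySem.List.pyGetD l (i + 1) 0))
      (PySem.List.pyRange 0 l.length 1) []
  simp only [decide_eq_true_eq] at h
  rw [h, List.nil_append, PySem.List.pyRange_one, List.filter_map, List.map_map]
  have hp : ((fun i => decide (i < (l.length : Int) - 1)) ∘ fun k : Nat => (0 : Int) + k)
      = fun k : Nat => decide (k < l.length - 1) := by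
    funext k; simp only [Function.comp]; rw [decide_eq_decide]; omega
  rw [hp, show ((l.length : Int) - 0).toNat = l.length from by omega,
      filter_lt_range _ _ (by omega)]
  apply List.map_congr_left
  intro k hk
  have hk' := List.mem_range.mp hk
  simp only [Function.comp]
  rw [show (0 : Int) + (k : Int) = ((k : Nat) : Int) by ring,
      PySem.List.pyGetD_natCast,
      show ((k : Nat) : Int) + 1 = ((k + 1 : Nat) : Int) by push_cast; ring,
      PySem.List.pyGetD_natCast]

theorem getD_reverse_take (l : List Int) (M k : Nat) (hM : M < l.length) (hk : k ≤ M) :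
    ((l.take (M + 1)).reverse).getD k 0 = l.getD (M - k) 0 := by
  rw [List.getD_eq_getElem _ _ (by simp; omega), List.getD_eq_getElem _ _ (by omega),
      List.getElem_reverse, List.getElem_take]
  congr 1
  simp; omega

theorem getD_drop (l : List Int) (M k : Nat) (h : M + k < l.length) :
    (l.drop M).getD k 0 = l.getD (M + k) 0 := by
  rw [List.getD_eq_getElem _ _ (by simp; omega), List.getD_eq_getElem _ _ (by omega),
      List.getElem_drop]

-- ===== VERDICT (by name: the statement is the Claim_ definition above) =====
theorem traverseList_spec : Claim_equal_traverseList := by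
  unfold Claim_equal_traverseList Spec_traverseList
  intro source mylist _ _
  simp only [traverseList, traverseList_alt]
  rw [findLastIdx_eq_find]
  rw [foldl_latest_eq_find_reverse
      (fun i => PySem.List.pyGetD mylist i 0 = PySem.List.pyGetD source 0 0)
      (PySem.List.pyRange 0 mylist.length 1) none]
  rw [PySem.List.pyRange_neg_one_eq_reverse,
      show (-1 : Int) + 1 = 0 from rfl,
      show ((mylist.length : Int) - 1) + 1 = (mylist.length : Int) from by ring]
  cases hfind : List.find?
      (fun i => decide (PySem.List.pyGetD mylist i 0 = PySem.List.pyGetD source 0 0))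
      (PySem.List.pyRange 0 (mylist.length : Int) 1).reverse with
  | none => simp
  | some m =>
    have hmem := List.mem_of_find?_eq_some hfind
    rw [List.mem_reverse, PySem.List.mem_pyRange_one] at hmem
    obtain ⟨M, rfl⟩ : ∃ M : Nat, m = (M : Int) := ⟨m.toNat, by omega⟩
    have hM : M < mylist.length := by omega
    dsimp only
    rw [PySem.List.slice_to mylist (by omega : (0 : Int) ≤ (M : Int) + 1),
        PySem.List.slice_some_none,
        show ((M : Int) + 1).toNat = M + 1 from by omega]
    have hclamp : PySem.List.clampIdx mylist.length (M : Int) = M := by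
      rw [PySem.List.clampIdx_natCast]; omega
    rw [hclamp, getCom_eq, getCom_eq,
        PySem.List.foldl_append_singleton_eq_map, PySem.List.foldl_append_singleton_eq_map,
        PySem.List.pyRange_neg_one, PySem.List.pyRange_one, List.map_map, List.map_map,
        List.nil_append]
    simp only [List.length_reverse, List.length_take, List.length_drop]
    rw [show min (M + 1) mylist.length - 1 = M from by omega,
        show ((M : Int) - 0).toNat = M from by omega,
        show ((mylist.length : Int) - 1 - (M : Int)).toNat = mylist.length - M - 1 from by omega]
    congr 1
    · apply List.map_congr_left
      intro k hk
      have hk' := List.mem_range.mp hk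
      simp only [Function.comp]
      rw [show (M : Int) - (k : Int) = ((M - k : Nat) : Int) from by omega,
          PySem.List.pyGetD_natCast,
          show ((M - k : Nat) : Int) - 1 = ((M - k - 1 : Nat) : Int) from by omega,
          PySem.List.pyGetD_natCast,
          getD_reverse_take mylist M k hM (by omega),
          getD_reverse_take mylist M (k + 1) hM (by omega),
          show M - (k + 1) = M - k - 1 from by omega]
    · apply List.map_congr_left
      intro k hk
      have hk' := List.mem_range.mp hk
      simp only [Function.comp]
      rw [show (M : Int) + (k : Int) = ((M + k : Nat) : Int) from by omega,
          PySem.List.pyGetD_natCast,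
          show ((M + k : Nat) : Int) + 1 = ((M + k + 1 : Nat) : Int) from by omega,
          PySem.List.pyGetD_natCast,
          getD_drop mylist M k (by omega),
          getD_drop mylist M (k + 1) (by omega), Nat.add_assoc]
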